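-- pv_equiv track=rewrite | github.com/ReallyDiffcult/bigdata | kafka/sparkSQL/test3.py | get_path_tup
-- ===== SOURCE A (Python) =====
-- def get_path_tup(path_tup = ()):
--     gov_url = path_tup[0]
--     path_list = path_tup[1]
--     dir_tup_list = []
--     for i in range(len(path_list)):
--         paths = path_list[i]
--         dir = ""
--         for j in range(len(paths)):
--             path = paths[j]
--             dir = dir + "/"+path if dir != "" else dir + path
--             dir_tup_list.append((dir,1))
--     return dir_tup_list
-- ===== SOURCE B (Python) =====
-- def _scan(acc, paths):
--     # recursive cumulative join: prefixes of paths joined by '/', each paired with 1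
--     if not paths:
--         return []
--     d = acc + "/" + paths[0] if acc else paths[0]
--     return [(d, 1)] + _scan(d, paths[1:])
--
-- def get_path_tup(path_tup = ()):
--     gov_url = path_tup[0]
--     path_list = path_tup[1]
--     return [tup for paths in path_list for tup in _scan("", paths)]
-- ===== Notes on version B (the rewrite author's own statement) =====
-- stated objective: alternative
-- what changed: Replaced the index-driven nested loops with a mutable string accumulator by a recursive prefix-scan helper per path list, flattened with a comprehension.
import Mathlib
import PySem

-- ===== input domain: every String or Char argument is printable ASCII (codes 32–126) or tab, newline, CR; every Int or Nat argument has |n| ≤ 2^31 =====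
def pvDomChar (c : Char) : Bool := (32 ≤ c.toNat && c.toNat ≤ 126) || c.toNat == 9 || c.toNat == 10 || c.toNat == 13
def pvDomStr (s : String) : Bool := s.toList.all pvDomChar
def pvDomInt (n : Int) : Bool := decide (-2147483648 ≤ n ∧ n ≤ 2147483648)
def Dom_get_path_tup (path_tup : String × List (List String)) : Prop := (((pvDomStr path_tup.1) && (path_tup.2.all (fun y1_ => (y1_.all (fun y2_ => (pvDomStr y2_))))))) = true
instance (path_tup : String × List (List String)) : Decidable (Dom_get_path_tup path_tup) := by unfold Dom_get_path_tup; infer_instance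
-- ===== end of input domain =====

-- B replaces A's index-driven nested loops by a recursive per-list prefix scan flattened with a comprehension (alternative decomposition, same cost).

-- ===== PORT A =====
def get_path_tup (path_tup : String × List (List String)) : List (String × Int) :=
  let _gov_url := path_tup.1
  let path_list := path_tup.2
  let dir_tup_list : List (String × Int) := []
  (PySem.List.pyRange 0 (PySem.List.len path_list) 1).foldl (fun acc i =>
    let paths := PySem.List.pyGetD path_list i []
    ((PySem.List.pyRange 0 (PySem.List.len paths) 1).foldl
      (fun (st : String × List (String × Int)) j =>
        let path := PySem.List.pyGetD paths j ""
        let dir := if st.1 ≠ "" then st.1 ++ "/" ++ path else st.1 ++ path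
        (dir, st.2 ++ [(dir, (1 : Int))])) ("", acc)).2) dir_tup_list

-- ===== PORT B =====
-- recursive cumulative join (_scan in Source B)
def pvScan (acc : String) (paths : List String) : List (String × Int) :=
  match paths with
  | [] => []
  | p :: rest =>
    let d := if acc ≠ "" then acc ++ "/" ++ p else p
    ((d, (1 : Int)) :: pvScan d rest)

def get_path_tup_alt (path_tup : String × List (List String)) : List (String × Int) :=
  let _gov_url := path_tup.1
  let path_list := path_tup.2
  path_list.flatMap (fun paths => pvScan "" paths)

-- ===== PRECONDITION & SPEC =====
def Spec_get_path_tup (path_tup : String × List (List String)) (out : List (String × Int)) : Prop := out = get_path_tup_alt path_tup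
instance (path_tup : String × List (List String)) (out : List (String × Int)) : Decidable (Spec_get_path_tup path_tup out) := by unfold Spec_get_path_tup; infer_instance

-- ===== CLAIM (what is proved, stated in full; the proofs are below) =====
def Claim_equal_get_path_tup : Prop := ∀ (path_tup : String × List (List String)), Dom_get_path_tup path_tup → Spec_get_path_tup path_tup (get_path_tup path_tup)

-- ===== LEMMAS AND PROOFS =====
-- A's inner loop, started at any dir, appends exactly pvScan dir paths to the accumulator.
lemma inner_eq (paths : List String) (dir : String) (acc : List (String × Int)) :
    (paths.foldl
      (fun (st : String × List (String × Int)) path =>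
        let d := if st.1 ≠ "" then st.1 ++ "/" ++ path else st.1 ++ path
        (d, st.2 ++ [(d, (1 : Int))])) (dir, acc)).2
      = acc ++ pvScan dir paths := by
  induction paths generalizing dir acc with
  | nil => simp [pvScan]
  | cons p rest ih =>
    calc ((p :: rest).foldl
            (fun (st : String × List (String × Int)) path =>
              let d := if st.1 ≠ "" then st.1 ++ "/" ++ path else st.1 ++ path
              (d, st.2 ++ [(d, (1 : Int))])) (dir, acc)).2
        = (acc ++ [((if dir ≠ "" then dir ++ "/" ++ p else dir ++ p), (1 : Int))])
            ++ pvScan (if dir ≠ "" then dir ++ "/" ++ p else dir ++ p) rest :=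
          ih (if dir ≠ "" then dir ++ "/" ++ p else dir ++ p)
             (acc ++ [((if dir ≠ "" then dir ++ "/" ++ p else dir ++ p), (1 : Int))])
      _ = acc ++ pvScan dir (p :: rest) := by
          by_cases h : dir = "" <;> simp [pvScan, h]

-- ===== VERDICT (by name: the statement is the Claim_ definition above) =====
theorem get_path_tup_spec : Claim_equal_get_path_tup := by
  intro pt _
  show get_path_tup pt = get_path_tup_alt pt
  unfold get_path_tup get_path_tup_alt
  simp only []
  rw [PySem.List.foldl_pyRange_zero_pyGetD pt.2 ([] : List String)
        (fun acc paths =>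
          ((PySem.List.pyRange 0 (PySem.List.len paths) 1).foldl
            (fun (st : String × List (String × Int)) j =>
              let path := PySem.List.pyGetD paths j ""
              let dir := if st.1 ≠ "" then st.1 ++ "/" ++ path else st.1 ++ path
              (dir, st.2 ++ [(dir, (1 : Int))])) ("", acc)).2) []]
  have hstep : ∀ (acc : List (String × Int)) (paths : List String),
      ((PySem.List.pyRange 0 (PySem.List.len paths) 1).foldl
        (fun (st : String × List (String × Int)) j =>
          let path := PySem.List.pyGetD paths j ""
          let dir := if st.1 ≠ "" then st.1 ++ "/" ++ path else st.1 ++ path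
          (dir, st.2 ++ [(dir, (1 : Int))])) ("", acc)).2
        = acc ++ pvScan "" paths := by
    intro acc paths
    rw [PySem.List.foldl_pyRange_zero_pyGetD paths ""
          (fun (st : String × List (String × Int)) path =>
            let d := if st.1 ≠ "" then st.1 ++ "/" ++ path else st.1 ++ path
            (d, st.2 ++ [(d, (1 : Int))])) ("", acc)]
    exact inner_eq paths "" acc
  calc pt.2.foldl _ ([] : List (String × Int))
      = pt.2.foldl (fun acc paths => acc ++ pvScan "" paths) [] := by
        apply PySem.List.foldl_congr_mem
        intro acc paths _
        exact hstep acc paths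
    _ = [] ++ pt.2.flatMap (fun paths => pvScan "" paths) :=
        PySem.List.foldl_append_eq_flatMap _ _ _
    _ = pt.2.flatMap (fun paths => pvScan "" paths) := by simp
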